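-- pv_equiv track=rewrite | github.com/elmolinoviejo/adventofcode | 2020/10/10.py | ways_from_seq
-- ===== SOURCE A (Python) =====
-- import math
--
-- def all_comb(n):
--     # all combinations nCr where r is [len(n)...0]
--     ac = 0
--     for x in range(n + 1):
--         ac += math.comb(n, x)
--     return ac
--
-- def ways_from_seq(seqs):
--     ans = 1
--     for n in seqs[1]:
--         m = all_comb(n - 1)
--         if n > 3:
--             m = m - 3**(n - 4)
--         ans *= m
--     return ans
-- ===== SOURCE B (Python) =====
-- import math
--
-- def ways_from_seq(seqs):
--     # closed form: sum_{x<=n-1} C(n-1,x) = 2**(n-1) for n>=1, 0 for n<1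
--     def count(n):
--         if n < 1:
--             return 0
--         m = 1 << (n - 1)
--         return m - 3 ** (n - 4) if n > 3 else m
--     return math.prod(map(count, seqs[1]))
-- ===== Notes on version B (the rewrite author's own statement) =====
-- stated objective: faster
-- what changed: Replaces the O(n) loop of big-int binomial coefficients (each O(n) or worse to compute) with the closed form sum_{x=0}^{n-1} C(n-1,x) = 2^(n-1), computed as a single bit shift, and folds the product with math.prod over a map instead of an explicit accumulator loop.
import Mathlib
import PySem

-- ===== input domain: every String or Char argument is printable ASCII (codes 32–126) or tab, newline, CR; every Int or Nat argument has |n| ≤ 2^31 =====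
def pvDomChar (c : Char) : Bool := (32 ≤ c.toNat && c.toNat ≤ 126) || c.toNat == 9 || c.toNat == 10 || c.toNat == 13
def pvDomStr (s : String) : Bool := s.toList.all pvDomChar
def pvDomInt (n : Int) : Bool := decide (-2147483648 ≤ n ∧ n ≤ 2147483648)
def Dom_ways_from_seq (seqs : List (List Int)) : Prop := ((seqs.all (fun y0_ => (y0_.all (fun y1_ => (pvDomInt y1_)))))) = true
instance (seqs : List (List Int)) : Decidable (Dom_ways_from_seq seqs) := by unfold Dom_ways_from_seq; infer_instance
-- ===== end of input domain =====

-- B replaces the per-element loop summing binomial coefficients by the closed form 2^(n-1)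
-- (a bit shift in Python) and takes the product with math.prod; objective: faster.

-- ===== PORT A =====
-- math.comb n x ported as Nat.choose n.toNat x.toNat: exact here, since the loop only
-- evaluates it for 0 ≤ x ≤ n (for n+1 ≤ 0 the range is empty and the loop body never runs).
def pvAllComb (n : Int) : Int :=
  (PySem.List.pyRange 0 (n + 1) 1).foldl
    (fun ac x => ac + (Nat.choose n.toNat x.toNat : Int)) 0

def ways_from_seq (seqs : List (List Int)) : Int :=
  match PySem.List.pyGet? seqs 1 with
  | none => 0  -- IndexError in Python; excluded by Pre_ways_from_seq
  | some row =>
    row.foldl (fun ans n =>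
      let m := pvAllComb (n - 1)
      let m := if n > 3 then m - (3 : Int) ^ (n - 4).toNat else m
      ans * m) 1

-- ===== PORT B =====
def pvCount (n : Int) : Int :=
  if n < 1 then 0
  else
    let m := (2 : Int) ^ (n - 1).toNat  -- 1 << (n - 1)
    if n > 3 then m - (3 : Int) ^ (n - 4).toNat else m

def ways_from_seq_alt (seqs : List (List Int)) : Int :=
  match PySem.List.pyGet? seqs 1 with
  | none => 0  -- IndexError in Python; excluded by Pre_ways_from_seq
  | some row => (row.map pvCount).prod

-- ===== PRECONDITION & SPEC =====
-- Pre_ excludes exactly the inputs with fewer than two rows, on which seqs[1] raises IndexError.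
def Pre_ways_from_seq (seqs : List (List Int)) : Prop := 2 ≤ seqs.length
instance (seqs : List (List Int)) : Decidable (Pre_ways_from_seq seqs) := by
  unfold Pre_ways_from_seq; infer_instance

def pvWitness_ways_from_seq : List (List Int) := [[1], [2, 5]]

def Spec_ways_from_seq (seqs : List (List Int)) (out : Int) : Prop := out = ways_from_seq_alt seqs
instance (seqs : List (List Int)) (out : Int) : Decidable (Spec_ways_from_seq seqs out) := by
  unfold Spec_ways_from_seq; infer_instance

-- ===== CLAIM (what is proved, stated in full; the proofs are below) =====
def Claim_equal_ways_from_seq : Prop := ∀ (seqs : List (List Int)), Dom_ways_from_seq seqs → Pre_ways_from_seq seqs → Spec_ways_from_seq seqs (ways_from_seq seqs)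

-- ===== LEMMAS AND PROOFS =====

theorem pv_list_sum_range (f : ℕ → ℕ) (n : ℕ) :
    ((List.range n).map f).sum = ∑ i ∈ Finset.range n, f i := by
  induction n with
  | zero => simp
  | succ n ih => rw [List.range_succ, Finset.sum_range_succ]; simp [ih]

theorem pv_foldl_add {α : Type} (f : α → Int) (l : List α) (a : Int) :
    l.foldl (fun ac x => ac + f x) a = a + (l.map f).sum := by
  induction l generalizing a with
  | nil => simp
  | cons x xs ih => simp [ih, add_assoc]

theorem pv_allComb_eq (n : Int) :
    pvAllComb (n - 1) = if n < 1 then 0 else (2 : Int) ^ (n - 1).toNat := by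
  unfold pvAllComb
  by_cases h : n < 1
  · rw [PySem.List.pyRange_one_eq_nil (by omega)]
    simp [h]
  · rw [if_neg h]
    rw [PySem.List.pyRange_one 0 (n - 1 + 1)]
    have hm : (n - 1 + 1 - 0).toNat = (n - 1).toNat + 1 := by omega
    rw [List.foldl_map,
      pv_foldl_add (fun y : ℕ => ((n - 1).toNat.choose (0 + (y : Int)).toNat : Int)),
      hm, zero_add]
    have hmap : List.map (fun y : ℕ => ((n - 1).toNat.choose (0 + (y : Int)).toNat : Int))
          (List.range ((n - 1).toNat + 1))
        = List.map (fun k : ℕ => ((n - 1).toNat.choose k : Int))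
          (List.range ((n - 1).toNat + 1)) := by
      apply List.map_congr_left; intro k _; norm_num
    rw [hmap,
      show (fun k : ℕ => ((n - 1).toNat.choose k : Int)) =
        (Nat.cast : ℕ → Int) ∘ (n - 1).toNat.choose from rfl,
      ← List.map_map, ← Nat.cast_list_sum, pv_list_sum_range, Nat.sum_range_choose]
    push_cast
    ring

theorem pv_body_eq (n : Int) :
    (let m := pvAllComb (n - 1)
     if n > 3 then m - (3 : Int) ^ (n - 4).toNat else m) = pvCount n := by
  rw [pv_allComb_eq]
  unfold pvCount
  by_cases h3 : n > 3
  · rw [if_pos h3, if_neg (by omega), if_neg (by omega), if_pos h3]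
  · rw [if_neg h3]
    by_cases h1 : n < 1
    · simp [h1]
    · rw [if_neg h1, if_neg h1, if_neg h3]

theorem pv_foldl_prod (l : List Int) (a : Int) :
    l.foldl (fun ans n => ans * pvCount n) a = a * (l.map pvCount).prod := by
  induction l generalizing a with
  | nil => simp
  | cons x xs ih => simp [ih, mul_assoc]

-- ===== VERDICT (by name: the statement is the Claim_ definition above) =====
theorem ways_from_seq_spec : Claim_equal_ways_from_seq := by
  intro seqs _ _
  unfold Spec_ways_from_seq ways_from_seq ways_from_seq_alt
  cases h : PySem.List.pyGet? seqs 1 with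
  | none => rfl
  | some row =>
    have hb : (fun (ans n : Int) =>
        let m := pvAllComb (n - 1)
        let m := if n > 3 then m - (3 : Int) ^ (n - 4).toNat else m
        ans * m) = (fun ans n => ans * pvCount n) := by
      funext ans n
      simp only [← pv_body_eq n]
    simp only [hb, pv_foldl_prod, one_mul]
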